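-- pv_equiv track=rewrite | github.com/danieltang/computer_vision | heading_detection/detect_heading.py | find_longest_ones
-- ===== SOURCE A (Python) =====
-- import itertools
--
-- def find_longest_ones(arr):
-- 	z = [(x[0], len(list(x[1]))) for x in itertools.groupby(arr)]
-- 	max_ones = -1
-- 	ind = 0
-- 	islands = [0, 0]
-- 	for (x, xlen) in z:
-- 		ind += xlen
-- 		if x==1 and xlen>max_ones:
-- 			islands[0] = ind
-- 			islands[1] = xlen
-- 			max_ones = xlen
-- 	left_index = islands[0]-islands[1]
-- 	right_index = islands[0]-1
-- 	return (left_index, right_index)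
-- ===== SOURCE B (Python) =====
-- def find_longest_ones(arr):
--     best_start = 0
--     best_len = 0
--     cur = 0
--     for i, x in enumerate(arr):
--         if x == 1:
--             cur += 1
--             if cur > best_len:
--                 best_start = i - cur + 1
--                 best_len = cur
--         else:
--             cur = 0
--     return (best_start, best_start + best_len - 1)
-- ===== Notes on version B (the rewrite author's own statement) =====
-- stated objective: simpler
-- what changed: Replaces A's materialized itertools.groupby run-length list plus a second fold over the (value, length) pairs with a single direct scan of the raw elements that maintains the current run of ones and the best run's start/length in place.
import Mathlib
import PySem

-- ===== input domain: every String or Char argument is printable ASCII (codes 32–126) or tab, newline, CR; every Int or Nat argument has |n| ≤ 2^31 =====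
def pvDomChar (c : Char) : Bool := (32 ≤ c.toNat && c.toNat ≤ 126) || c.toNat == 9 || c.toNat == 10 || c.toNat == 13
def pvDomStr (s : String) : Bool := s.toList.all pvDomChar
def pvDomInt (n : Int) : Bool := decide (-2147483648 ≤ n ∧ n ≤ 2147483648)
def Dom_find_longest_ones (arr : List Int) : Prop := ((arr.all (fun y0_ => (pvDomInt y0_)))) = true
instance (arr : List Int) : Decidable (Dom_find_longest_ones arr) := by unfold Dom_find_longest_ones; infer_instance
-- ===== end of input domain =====

-- B replaces A's materialized groupby run-length list with a single on-the-fly scan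
-- tracking the current run of ones (objective: simpler).

-- ===== PORT A =====
-- itertools.groupby rendered as a run-length encoding: one (value, group length) pair
-- per maximal run of equal consecutive elements, left to right.
def pvRle (l : List Int) : List (Int × Int) :=
  match l with
  | [] => []
  | x :: xs =>
    (x, 1 + ((xs.takeWhile (· = x)).length : Int)) :: pvRle (xs.dropWhile (· = x))
termination_by l.length
decreasing_by
  have := List.length_dropWhile_le (fun y => decide (y = x)) xs
  simpa using Nat.lt_succ_of_le this

-- the for-loop over z: state (max_ones, ind, islands0, islands1)
def pvLoopA (z : List (Int × Int)) (s : Int × Int × Int × Int) : Int × Int × Int × Int :=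
  match z with
  | [] => s
  | (x, xlen) :: rest =>
    let (maxOnes, ind, isl0, isl1) := s
    let ind' := ind + xlen
    if x = 1 ∧ xlen > maxOnes then
      pvLoopA rest (xlen, ind', ind', xlen)
    else
      pvLoopA rest (maxOnes, ind', isl0, isl1)

def find_longest_ones (arr : List Int) : Int × Int :=
  let z := pvRle arr
  let s := pvLoopA z (-1, 0, 0, 0)
  (s.2.2.1 - s.2.2.2, s.2.2.1 - 1)

-- ===== PORT B =====
-- single pass with index i and state (best_start, best_len, cur)
def pvLoopB (i : Int) (l : List Int) (s : Int × Int × Int) : Int × Int × Int :=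
  match l with
  | [] => s
  | x :: xs =>
    let (bs, bl, cur) := s
    if x = 1 then
      let cur' := cur + 1
      if cur' > bl then pvLoopB (i + 1) xs (i - cur' + 1, cur', cur')
      else pvLoopB (i + 1) xs (bs, bl, cur')
    else
      pvLoopB (i + 1) xs (bs, bl, 0)

def find_longest_ones_alt (arr : List Int) : Int × Int :=
  let s := pvLoopB 0 arr (0, 0, 0)
  (s.1, s.1 + s.2.1 - 1)

-- ===== PRECONDITION & SPEC =====
def Spec_find_longest_ones (arr : List Int) (out : Int × Int) : Prop := out = find_longest_ones_alt arr
instance (arr : List Int) (out : Int × Int) : Decidable (Spec_find_longest_ones arr out) := by unfold Spec_find_longest_ones; infer_instance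

-- ===== CLAIM (what is proved, stated in full; the proofs are below) =====
def Claim_equal_find_longest_ones : Prop := ∀ (arr : List Int), Dom_find_longest_ones arr → Spec_find_longest_ones arr (find_longest_ones arr)

-- ===== LEMMAS AND PROOFS =====

-- the invariant linking A's loop state (max_ones, islands) with B's (best_start, best_len)
def pvInv (maxOnes isl0 isl1 bs bl : Int) : Prop :=
  (maxOnes = -1 ∧ isl0 = 0 ∧ isl1 = 0 ∧ bs = 0 ∧ bl = 0) ∨
  (1 ≤ maxOnes ∧ maxOnes = bl ∧ isl1 = bl ∧ isl0 = bs + bl)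

lemma pvLoopB_append (l1 l2 : List Int) (i : Int) (s : Int × Int × Int) :
    pvLoopB i (l1 ++ l2) s = pvLoopB (i + l1.length) l2 (pvLoopB i l1 s) := by
  induction l1 generalizing i s with
  | nil => simp [pvLoopB]
  | cons x xs ih =>
    obtain ⟨bs, bl, cur⟩ := s
    simp only [List.cons_append, pvLoopB, List.length_cons, Nat.cast_add, Nat.cast_one]
    have harith : i + (↑xs.length + 1) = i + 1 + ↑xs.length := by ring
    split_ifs <;> rw [ih, harith]

lemma pvLoopB_cons_one (i bs bl cur : Int) (l : List Int) :
    pvLoopB i (1 :: l) (bs, bl, cur) =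
      if cur + 1 > bl then pvLoopB (i + 1) l (i - (cur + 1) + 1, cur + 1, cur + 1)
      else pvLoopB (i + 1) l (bs, bl, cur + 1) := by
  rw [pvLoopB]; simp

lemma pvLoopB_ones (k : Nat) : ∀ (i bs bl cur : Int), 0 ≤ cur → cur ≤ bl →
    pvLoopB i (List.replicate k 1) (bs, bl, cur) =
      if bl < cur + k then (i - cur, cur + k, cur + k) else (bs, bl, cur + k) := by
  induction k with
  | zero =>
    intro i bs bl cur _ hle
    simp only [List.replicate_zero, pvLoopB, Nat.cast_zero, add_zero]
    rw [if_neg (by omega)]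
  | succ k ih =>
    intro i bs bl cur hcur hle
    rw [List.replicate_succ, pvLoopB_cons_one]
    by_cases h : cur + 1 > bl
    · rw [if_pos h, ih (i+1) (i - (cur+1) + 1) (cur+1) (cur+1) (by omega) le_rfl]
      by_cases h3 : (cur + 1 : Int) < cur + 1 + k
      · rw [if_pos h3, if_pos (show bl < cur + ((k+1 : Nat) : Int) by omega)]
        simp only [Prod.mk.injEq]
        omega
      · rw [if_neg h3, if_pos (show bl < cur + ((k+1 : Nat) : Int) by omega)]
        simp only [Prod.mk.injEq]
        omega
    · rw [if_neg h, ih (i+1) bs bl (cur+1) (by omega) (by omega)]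
      by_cases h2 : bl < cur + 1 + (k : Int)
      · rw [if_pos h2, if_pos (show bl < cur + ((k+1 : Nat) : Int) by omega)]
        simp only [Prod.mk.injEq]
        omega
      · rw [if_neg h2, if_neg (show ¬ bl < cur + ((k+1 : Nat) : Int) by omega)]
        simp only [Prod.mk.injEq, true_and]
        omega

lemma pvLoopB_nonones (v : Int) (hv : v ≠ 1) (k : Nat) (hk : 0 < k) :
    ∀ (i bs bl cur : Int), pvLoopB i (List.replicate k v) (bs, bl, cur) = (bs, bl, 0) := by
  induction k with
  | zero => omega
  | succ k ih =>
    intro i bs bl cur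
    rw [List.replicate_succ, pvLoopB]
    simp only [if_neg hv]
    cases k with
    | zero => simp [pvLoopB]
    | succ m => exact ih (Nat.succ_pos m) (i+1) bs bl 0

lemma pvTakeWhile_replicate (x : Int) (l : List Int) :
    l.takeWhile (· = x) = List.replicate (l.takeWhile (· = x)).length x := by
  apply List.eq_replicate_of_mem
  intro b hb
  have := List.mem_takeWhile_imp hb
  simpa using this

lemma pvHead?_dropWhile (x : Int) (l : List Int) :
    ∀ y ∈ (l.dropWhile (· = x)).head?, y ≠ x := by
  induction l with
  | nil => simp
  | cons a as ih =>
    by_cases h : a = x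
    · simpa [List.dropWhile, h] using ih
    · simp [List.dropWhile, h]

-- the final projections of B's loop do not depend on the incoming cur when the
-- next element (if any) is not 1
lemma pvProjIrrel (rest : List Int) (h : ∀ y ∈ rest.head?, y ≠ 1) (n bs bl cur cur' : Int) :
    ((pvLoopB n rest (bs, bl, cur)).1,
      (pvLoopB n rest (bs, bl, cur)).1 + (pvLoopB n rest (bs, bl, cur)).2.1 - 1) =
    ((pvLoopB n rest (bs, bl, cur')).1,
      (pvLoopB n rest (bs, bl, cur')).1 + (pvLoopB n rest (bs, bl, cur')).2.1 - 1) := by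
  match rest with
  | [] => rfl
  | y :: ys =>
    have hy : y ≠ 1 := h y (by simp)
    rw [pvLoopB, pvLoopB]
    simp only [if_neg hy]

lemma pvInvBlNonneg (maxOnes isl0 isl1 bs bl : Int) (h : pvInv maxOnes isl0 isl1 bs bl) :
    0 ≤ bl := by
  rcases h with ⟨_,_,_,_,h5⟩ | ⟨h1,h2,_,_⟩ <;> omega

lemma pvMain (arr : List Int) : ∀ (n maxOnes isl0 isl1 bs bl cur : Int),
    pvInv maxOnes isl0 isl1 bs bl → cur = 0 →
    (let s := pvLoopA (pvRle arr) (maxOnes, n, isl0, isl1);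
     (s.2.2.1 - s.2.2.2, s.2.2.1 - 1)) =
    (let t := pvLoopB n arr (bs, bl, cur); (t.1, t.1 + t.2.1 - 1)) := by
  intro n maxOnes isl0 isl1 bs bl cur hinv hcur
  match arr with
  | [] =>
    simp only [pvRle, pvLoopA, pvLoopB]
    rcases hinv with ⟨h1, h2, h3, h4, h5⟩ | ⟨h1, h2, h3, h4⟩ <;> simp [*]
  | x :: xs =>
    subst hcur
    set tw := xs.takeWhile (· = x) with htw
    set rest := xs.dropWhile (· = x) with hrest
    have hsplit : x :: xs = List.replicate (1 + tw.length) x ++ rest := by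
      have hxs : xs = tw ++ rest := (List.takeWhile_append_dropWhile).symm
      rw [List.replicate_add, List.replicate_one]
      simp only [List.cons_append, List.nil_append]
      rw [htw] at hxs ⊢
      rw [pvTakeWhile_replicate x xs] at hxs
      exact congrArg (x :: ·) hxs
    have hlen : rest.length < (x :: xs).length := by
      have := List.length_dropWhile_le (fun y => decide (y = x)) xs
      simp only [hrest, List.length_cons]
      simpa using Nat.lt_succ_of_le this
    have hrhead : ∀ y ∈ rest.head?, y ≠ x := pvHead?_dropWhile x xs
    have hA : pvRle (x :: xs) = (x, 1 + (tw.length : Int)) :: pvRle rest := by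
      rw [pvRle]
    set k : Nat := 1 + tw.length with hk
    have hkpos : 0 < k := by omega
    have hklen : ((k : Int)) = 1 + (tw.length : Int) := by push_cast [hk]; ring
    have hB : pvLoopB n (x :: xs) (bs, bl, 0) =
        pvLoopB (n + k) rest (pvLoopB n (List.replicate k x) (bs, bl, 0)) := by
      conv_lhs => rw [hsplit]
      rw [pvLoopB_append]; simp [hk]
    have hbl0 : 0 ≤ bl := pvInvBlNonneg _ _ _ _ _ hinv
    by_cases hx : x = 1
    · subst hx
      rw [hB, pvLoopB_ones k n bs bl 0 le_rfl hbl0]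
      rw [hA]
      simp only [pvLoopA, ← hklen]
      by_cases hgt : (k : Int) > maxOnes
      · rw [if_pos ⟨trivial, hgt⟩]
        have hbl : bl < 0 + (k : Int) := by
          rcases hinv with ⟨h1,h2,h3,h4,h5⟩ | ⟨h1,h2,h3,h4⟩ <;> omega
        rw [if_pos hbl]
        have hrec := pvMain rest (n + k) k (n + k) k n k 0
          (by right; refine ⟨?_, rfl, rfl, rfl⟩; omega) rfl
        simp only [sub_zero, zero_add]
        rw [pvProjIrrel rest hrhead (n + k) n (k : Int) (k : Int) 0]
        simpa using hrec
      · rw [if_neg (by tauto)]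
        have hmeq : maxOnes = bl ∧ 1 ≤ maxOnes := by
          rcases hinv with ⟨h1,h2,h3,h4,h5⟩ | ⟨h1,h2,h3,h4⟩
          · exfalso; omega
          · exact ⟨h2, h1⟩
        rw [if_neg (by omega)]
        have hrec := pvMain rest (n + k) maxOnes isl0 isl1 bs bl 0 hinv rfl
        simp only [zero_add]
        rw [pvProjIrrel rest hrhead (n + k) bs bl (k : Int) 0]
        simpa using hrec
    · rw [hB, pvLoopB_nonones x hx k hkpos n bs bl 0]
      rw [hA]
      simp only [pvLoopA]
      rw [if_neg (by tauto)]
      have hrec := pvMain rest (n + (1 + (tw.length:Int))) maxOnes isl0 isl1 bs bl 0 hinv rfl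
      simpa using hrec
termination_by arr.length
decreasing_by all_goals simpa using hlen

-- ===== VERDICT (by name: the statement is the Claim_ definition above) =====
theorem find_longest_ones_spec : Claim_equal_find_longest_ones := by
  intro arr _
  unfold Spec_find_longest_ones find_longest_ones find_longest_ones_alt
  have := pvMain arr 0 (-1) 0 0 0 0 0 (Or.inl ⟨rfl, rfl, rfl, rfl, rfl⟩) rfl
  simpa using this
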